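-- pv_equiv track=rewrite | github.com/ronGeva/algorithms | DBsCourse/ex2.py | best_bcnf_breaking_dependency
-- ===== SOURCE A (Python) =====
-- from typing import List, Tuple, Any, Dict, Optional, Set
--
-- def best_bcnf_breaking_dependency(dependant_columns: Dict[Tuple[str], List[str]]) -> Optional[Tuple[str]]:
--     """
--     Retrieves a dependency that breaks BCNF - aka a dependency between a group of columns A to a group of columns B
--     such that A->B.
--     We prioritize the rules in this order:
--     1. Minimal left side size (len(A) should be as small as possible).
--     2. Maximal right hand size (len(B) should be as big as possible).
--     """
--     for source_size in range(1, 5):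
--         max_right_hand = (None, 0)
--         for source_cols in dependant_columns:
--             if len(set(source_cols)) != source_size:
--                 continue
--
--             if len(dependant_columns[source_cols]) > max_right_hand[1]:
--                 max_right_hand = (source_cols, len(dependant_columns[source_cols]))
--
--         if max_right_hand[0] is not None:
--             return max_right_hand[0]
--
--     return None
-- ===== SOURCE B (Python) =====
-- def best_bcnf_breaking_dependency(dependant_columns):
--     # One pass: best candidate per left-size (1..4), then pick smallest size.
--     best = {}  # left-size -> (source_cols, right_len)
--     for source_cols, right in dependant_columns.items():
--         size = len(set(source_cols))
--         if 1 <= size <= 4: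
--             cur_len = best[size][1] if size in best else 0
--             if len(right) > cur_len:
--                 best[size] = (source_cols, len(right))
--     for size in (1, 2, 3, 4):
--         if size in best:
--             return best[size][0]
--     return None
-- ===== Notes on version B (the rewrite author's own statement) =====
-- stated objective: faster
-- what changed: Replaces A's four full rescans of the dict (one per left-size) with a single pass that maintains a best-candidate-per-left-size table, followed by a constant-size ordered selection.
import Mathlib
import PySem

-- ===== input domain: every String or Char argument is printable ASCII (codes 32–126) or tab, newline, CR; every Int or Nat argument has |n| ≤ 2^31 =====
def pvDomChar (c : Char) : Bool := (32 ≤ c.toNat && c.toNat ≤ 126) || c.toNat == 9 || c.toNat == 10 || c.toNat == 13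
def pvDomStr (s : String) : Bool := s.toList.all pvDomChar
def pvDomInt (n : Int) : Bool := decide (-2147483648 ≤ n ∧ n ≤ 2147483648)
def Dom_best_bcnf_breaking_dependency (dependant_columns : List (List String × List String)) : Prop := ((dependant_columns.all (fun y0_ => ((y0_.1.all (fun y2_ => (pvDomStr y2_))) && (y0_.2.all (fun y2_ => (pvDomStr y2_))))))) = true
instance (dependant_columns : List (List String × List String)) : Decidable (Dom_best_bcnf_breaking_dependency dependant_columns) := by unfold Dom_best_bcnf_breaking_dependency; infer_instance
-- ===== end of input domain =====

-- B replaces A's four full rescans (one per left-size) with a single pass building a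
-- best-candidate-per-left-size table plus a constant-size ordered selection (faster by a constant factor).


-- len(set(source_cols)) — number of distinct column names
def pvLenDistinct (cols : List String) : Nat := (PySem.Set.ofList cols).length

-- ===== PORT A =====
-- A's inner loop body: scan for the strictly-largest right-hand side among keys of distinct-size s
def pvAStep (s : Nat) (acc : Option (List String) × Nat) (kv : List String × List String) :
    Option (List String) × Nat :=
  if pvLenDistinct kv.1 ≠ s then acc
  else if kv.2.length > acc.2 then (some kv.1, kv.2.length) else acc

-- A's outer loop over source_size in range(1, 5)
def pvALoop (deps : List (List String × List String)) : List Nat → Option (List String)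
  | [] => none
  | s :: rest =>
    match (deps.foldl (pvAStep s) (none, 0)).1 with
    | some k => some k
    | none => pvALoop deps rest

def best_bcnf_breaking_dependency (dependant_columns : List (List String × List String)) :
    Option (List String) :=
  pvALoop dependant_columns [1, 2, 3, 4]

-- ===== PORT B =====
-- B's single-pass loop body: update the best-per-left-size table at key size = len(set(cols))
def pvBStep (d : PySem.Dict Nat (List String × Nat)) (kv : List String × List String) :
    PySem.Dict Nat (List String × Nat) :=
  let size := pvLenDistinct kv.1
  if 1 ≤ size ∧ size ≤ 4 then
    let curLen := match d.get? size with | some p => p.2 | none => 0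
    if kv.2.length > curLen then d.insert size (kv.1, kv.2.length) else d
  else d

-- B's final selection: first size in (1, 2, 3, 4) present in the table
def pvBSelect (t : PySem.Dict Nat (List String × Nat)) : List Nat → Option (List String)
  | [] => none
  | s :: rest =>
    match t.get? s with
    | some p => some p.1
    | none => pvBSelect t rest

def best_bcnf_breaking_dependency_alt (dependant_columns : List (List String × List String)) :
    Option (List String) :=
  pvBSelect (dependant_columns.foldl pvBStep PySem.Dict.empty) [1, 2, 3, 4]

-- ===== PRECONDITION & SPEC =====
def Spec_best_bcnf_breaking_dependency (dependant_columns : List (List String × List String)) (out : Option (List String)) : Prop := out = best_bcnf_breaking_dependency_alt dependant_columns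
instance (dependant_columns : List (List String × List String)) (out : Option (List String)) : Decidable (Spec_best_bcnf_breaking_dependency dependant_columns out) := by unfold Spec_best_bcnf_breaking_dependency; infer_instance

-- ===== CLAIM (what is proved, stated in full; the proofs are below) =====
def Claim_equal_best_bcnf_breaking_dependency : Prop := ∀ (dependant_columns : List (List String × List String)), Dom_best_bcnf_breaking_dependency dependant_columns → Spec_best_bcnf_breaking_dependency dependant_columns (best_bcnf_breaking_dependency dependant_columns)

-- ===== LEMMAS AND PROOFS =====
-- correspondence between a table entry at key s and A's scan accumulator for size s
def pvRep : Option (List String) × Nat → Option (List String × Nat)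
  | (none, _) => none
  | (some k, n) => some (k, n)

def pvUnrep : Option (List String × Nat) → Option (List String) × Nat
  | none => (none, 0)
  | some (k, n) => (some k, n)

theorem pvRep_unrep (x : Option (List String × Nat)) : pvRep (pvUnrep x) = x := by
  rcases x with _ | ⟨k, n⟩ <;> rfl

theorem pvStep_comm (d : PySem.Dict Nat (List String × Nat)) (kv : List String × List String)
    (s : Nat) (h1 : 1 ≤ s) (h4 : s ≤ 4) :
    pvUnrep ((pvBStep d kv).get? s) = pvAStep s (pvUnrep (d.get? s)) kv := by
  unfold pvBStep pvAStep
  by_cases hse : pvLenDistinct kv.1 = s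
  · subst hse
    have hsz : 1 ≤ pvLenDistinct kv.1 ∧ pvLenDistinct kv.1 ≤ 4 := ⟨h1, h4⟩
    rcases hg : d.get? (pvLenDistinct kv.1) with _ | ⟨k, n⟩ <;>
      rw [if_pos hsz] <;> simp only [hg, pvUnrep, ne_eq, not_true_eq_false, if_false] <;>
      split_ifs with hlen <;>
      simp [PySem.Dict.get?_insert_self, hg]
  · by_cases hsz : 1 ≤ pvLenDistinct kv.1 ∧ pvLenDistinct kv.1 ≤ 4
    · rw [if_pos hsz]
      simp only [ne_eq, hse, not_false_eq_true, if_true]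
      split_ifs with hlen
      · rw [PySem.Dict.get?_insert_of_ne d _ (fun h => hse h.symm)]
      · rfl
    · simp only [hsz, if_false, ne_eq, hse, not_false_eq_true, if_true]

theorem pvFold_comm (deps : List (List String × List String))
    (d : PySem.Dict Nat (List String × Nat)) (s : Nat) (h1 : 1 ≤ s) (h4 : s ≤ 4) :
    pvUnrep ((deps.foldl pvBStep d).get? s) = deps.foldl (pvAStep s) (pvUnrep (d.get? s)) := by
  induction deps generalizing d with
  | nil => rfl
  | cons kv rest ih =>
    simp only [List.foldl_cons]
    rw [ih (pvBStep d kv), pvStep_comm d kv s h1 h4]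

theorem pvTable_get (deps : List (List String × List String)) (s : Nat)
    (h1 : 1 ≤ s) (h4 : s ≤ 4) :
    (deps.foldl pvBStep PySem.Dict.empty).get? s = pvRep (deps.foldl (pvAStep s) (none, 0)) := by
  have h := pvFold_comm deps PySem.Dict.empty s h1 h4
  have : pvUnrep ((PySem.Dict.empty : PySem.Dict Nat (List String × Nat)).get? s) = (none, 0) := rfl
  rw [this] at h
  rw [← h, pvRep_unrep]

theorem pvSelect_eq_loop (deps : List (List String × List String)) (l : List Nat)
    (hl : ∀ s ∈ l, 1 ≤ s ∧ s ≤ 4) :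
    pvBSelect (deps.foldl pvBStep PySem.Dict.empty) l = pvALoop deps l := by
  induction l with
  | nil => rfl
  | cons s rest ih =>
    have hs := hl s (List.mem_cons_self ..)
    unfold pvBSelect pvALoop
    rw [pvTable_get deps s hs.1 hs.2, ih (fun t ht => hl t (List.mem_cons_of_mem _ ht))]
    rcases hx : deps.foldl (pvAStep s) (none, 0) with ⟨_ | k, n⟩ <;> rfl

-- ===== VERDICT (by name: the statement is the Claim_ definition above) =====
theorem best_bcnf_breaking_dependency_spec : Claim_equal_best_bcnf_breaking_dependency := by
  intro deps _
  unfold Spec_best_bcnf_breaking_dependency best_bcnf_breaking_dependency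
    best_bcnf_breaking_dependency_alt
  rw [pvSelect_eq_loop deps [1, 2, 3, 4] (by decide)]
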